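-- pv_equiv track=rewrite | github.com/Jennifer-Vo/Club-Recommendation-System- | club_functions.py | get_clubs_of_friends
-- ===== SOURCE A (Python) =====
-- from typing import List, Tuple, Dict, TextIO
--
-- def get_clubs_of_friends(person_to_friends: Dict[str, List[str]],
--                          person_to_clubs: Dict[str, List[str]],
--                          person: str) -> List[str]:
--     """Return a list, sorted in alphabetical order, of the clubs in
--     person_to_clubs that person's friends from person_to_friends
--     belong to, excluding the clubs that person belongs to.  Each club
--     appears in the returned list once per each of the person's friends
--     who belong to it.
--
--     >>> get_clubs_of_friends(P2F, P2C, 'Danny R Tanner')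
--     ['Comics R Us', 'Rock N Rollers']
--     >>> get_clubs_of_friends(P2F, P2C, 'Michelle Tanner')
--     []
--     """
--     list_clubs = []
--     if person not in person_to_friends:
--         return []
--     for key in person_to_clubs:
--         if key in person_to_friends[person]:
--             for club in person_to_clubs[key]:
--                 if person not in person_to_clubs:
--                     list_clubs.append(club)
--                     list_clubs.sort()
--                 if person in person_to_clubs and club not in person_to_clubs\
--                 [person]:
--                     list_clubs.append(club)
--                     list_clubs.sort()
--     return list_clubs
-- ===== SOURCE B (Python) =====
-- def get_clubs_of_friends(person_to_friends, person_to_clubs, person):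
--     if person not in person_to_friends:
--         return []
--     friends = set(person_to_friends[person])
--     own = set(person_to_clubs.get(person, ()))
--     counts = {}
--     for key, clubs in person_to_clubs.items():
--         if key in friends:
--             for club in clubs:
--                 if club not in own:
--                     counts[club] = counts.get(club, 0) + 1
--     out = []
--     for club in sorted(counts):
--         out.extend([club] * counts[club])
--     return out
-- ===== Notes on version B (the rewrite author's own statement) =====
-- stated objective: faster
-- what changed: B replaces A's sorted-multiset accumulator (append + full re-sort after every append, with per-club list scans) by a counting algorithm: build a club->count dictionary in one pass using set membership for friends and own clubs, sort only the distinct club names once, and expand each name by its count.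
import Mathlib
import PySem

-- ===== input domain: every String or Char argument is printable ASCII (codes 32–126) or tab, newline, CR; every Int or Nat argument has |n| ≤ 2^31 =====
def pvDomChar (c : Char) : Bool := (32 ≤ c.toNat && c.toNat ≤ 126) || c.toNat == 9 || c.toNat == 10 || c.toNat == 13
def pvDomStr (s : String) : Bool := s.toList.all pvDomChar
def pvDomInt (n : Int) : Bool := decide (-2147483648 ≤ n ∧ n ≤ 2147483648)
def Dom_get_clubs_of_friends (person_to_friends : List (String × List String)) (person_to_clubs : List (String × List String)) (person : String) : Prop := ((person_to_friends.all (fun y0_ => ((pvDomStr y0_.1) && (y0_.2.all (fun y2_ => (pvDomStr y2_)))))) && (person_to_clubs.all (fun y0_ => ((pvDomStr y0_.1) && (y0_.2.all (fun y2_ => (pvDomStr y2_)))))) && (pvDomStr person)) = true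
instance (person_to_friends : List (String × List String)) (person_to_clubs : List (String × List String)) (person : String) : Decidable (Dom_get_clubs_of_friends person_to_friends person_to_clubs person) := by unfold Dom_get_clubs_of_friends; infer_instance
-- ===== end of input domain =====

-- B replaces A's sorted-multiset accumulator (full re-sort after every append) by a counting
-- algorithm: a club -> count dictionary built in one pass, one sort of the distinct club names,
-- and expansion of each name by its count; return value proved equal on all inputs.

-- ===== PORT A =====
-- literal transliteration of A: iterate over the clubs dict's keys, re-index both dicts,
-- append each qualifying club and re-sort the accumulator after every append
def get_clubs_of_friends (person_to_friends : List (String × List String)) (person_to_clubs : List (String × List String)) (person : String) : List String :=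
  let p2f : PySem.Dict String (List String) := PySem.Dict.ofList person_to_friends
  let p2c : PySem.Dict String (List String) := PySem.Dict.ofList person_to_clubs
  if p2f.contains person = false then []
  else
    p2c.keys.foldl (fun list_clubs key =>
      if key ∈ p2f.getD person [] then
        (p2c.getD key []).foldl (fun list_clubs club =>
          let list_clubs :=
            if p2c.contains person = false then
              PySem.List.sorted (list_clubs ++ [club]) (fun x => x) false
            else list_clubs
          if p2c.contains person = true ∧ club ∉ p2c.getD person [] then
            PySem.List.sorted (list_clubs ++ [club]) (fun x => x) false
          else list_clubs) list_clubs
      else list_clubs) []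

-- ===== PORT B =====
-- transliteration of B: sets for the friends / own-clubs membership tests, a counting dict
-- 'counts[club] = counts.get(club, 0) + 1' filled in one pass over the clubs dict, then the
-- distinct club names sorted once and each expanded ([club] * counts[club]) into the output
def get_clubs_of_friends_alt (person_to_friends : List (String × List String)) (person_to_clubs : List (String × List String)) (person : String) : List String :=
  let p2f : PySem.Dict String (List String) := PySem.Dict.ofList person_to_friends
  if p2f.contains person = false then []
  else
    let p2c : PySem.Dict String (List String) := PySem.Dict.ofList person_to_clubs
    let friends : PySem.Set String := PySem.Set.ofList (p2f.getD person [])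
    let own : PySem.Set String := PySem.Set.ofList (p2c.getD person [])
    let counts : PySem.Dict String Int :=
      p2c.items.foldl (fun counts kv =>
        if PySem.Set.contains friends kv.1 = true then
          kv.2.foldl (fun counts club =>
            if PySem.Set.contains own club = false then
              counts.modify club 0 (· + 1)
            else counts) counts
        else counts) PySem.Dict.empty
    (PySem.List.sorted counts.keys (fun x => x) false).foldl
      (fun out club => out ++ List.replicate (counts.getD club 0).toNat club) []

-- ===== PRECONDITION & SPEC =====
def Spec_get_clubs_of_friends (person_to_friends : List (String × List String)) (person_to_clubs : List (String × List String)) (person : String) (out : List String) : Prop := out = get_clubs_of_friends_alt person_to_friends person_to_clubs person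
instance (person_to_friends : List (String × List String)) (person_to_clubs : List (String × List String)) (person : String) (out : List String) : Decidable (Spec_get_clubs_of_friends person_to_friends person_to_clubs person out) := by unfold Spec_get_clubs_of_friends; infer_instance

-- ===== CLAIM (what is proved, stated in full; the proofs are below) =====
def Claim_equal_get_clubs_of_friends : Prop := ∀ (person_to_friends : List (String × List String)) (person_to_clubs : List (String × List String)) (person : String), Dom_get_clubs_of_friends person_to_friends person_to_clubs person → Spec_get_clubs_of_friends person_to_friends person_to_clubs person (get_clubs_of_friends person_to_friends person_to_clubs person)

-- ===== LEMMAS AND PROOFS =====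

-- sorting again after appending to an already-sorted accumulator = sorting the whole multiset once
lemma sorted_sorted_append (acc : List String) (c : String) :
    PySem.List.sorted (PySem.List.sorted acc (fun x => x) false ++ [c]) (fun x => x) false
      = PySem.List.sorted (acc ++ [c]) (fun x => x) false :=
  PySem.List.sorted_eq_sorted_of_perm _ _ _ Function.injective_id
    ((PySem.List.sorted_perm acc (fun x => x) false).append (List.Perm.refl [c]))

-- A's inner loop (append-then-resort, guarded by p) starting from a sorted accumulator
lemma inner_loop (xs : List String) (p : String → Bool) :
    ∀ acc : List String,
      xs.foldl (fun a c => if p c = true then PySem.List.sorted (a ++ [c]) (fun x => x) false else a)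
        (PySem.List.sorted acc (fun x => x) false)
      = PySem.List.sorted (acc ++ xs.filter p) (fun x => x) false := by
  induction xs with
  | nil => intro acc; simp
  | cons c xs ih =>
    intro acc
    by_cases hc : p c = true
    · simp only [List.foldl_cons, if_pos hc, sorted_sorted_append, ih (acc ++ [c]),
        List.filter_cons_of_pos hc, List.append_assoc, List.singleton_append]
    · simp only [List.foldl_cons, if_neg hc, ih acc,
        List.filter_cons_of_neg hc]

-- A's outer loop over the (key, clubs) items, starting from a sorted accumulator
lemma outer_loop (items : List (String × List String)) (q : String → Bool) (p : String → Bool) :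
    ∀ acc : List String,
      items.foldl (fun a kv =>
          if q kv.1 = true then
            kv.2.foldl (fun a2 c => if p c = true then PySem.List.sorted (a2 ++ [c]) (fun x => x) false else a2) a
          else a)
        (PySem.List.sorted acc (fun x => x) false)
      = PySem.List.sorted
          (acc ++ (items.filter (fun kv => q kv.1)).flatMap (fun kv => kv.2.filter p))
          (fun x => x) false := by
  induction items with
  | nil => intro acc; simp
  | cons kv items ih =>
    intro acc
    by_cases hq : q kv.1 = true
    · rw [List.foldl_cons, if_pos hq, inner_loop kv.2 p acc, ih (acc ++ kv.2.filter p)]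
      simp [hq, List.append_assoc]
    · rw [List.foldl_cons, if_neg hq, ih acc]
      simp [hq]

-- counting occurrences in an expansion over distinct keys
lemma count_expand (ks : List String) (hnd : ks.Nodup) (n : String → Nat) (v : String) :
    (ks.flatMap (fun k => List.replicate (n k) k)).count v = if v ∈ ks then n v else 0 := by
  induction ks with
  | nil => simp
  | cons k ks ih =>
    rw [List.flatMap_cons, List.count_append, List.count_replicate, ih hnd.of_cons]
    by_cases hv : v = k
    · subst hv
      have : v ∉ ks := (List.nodup_cons.mp hnd).1
      simp [this]
    · simp [hv, Ne.symm hv]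

-- an expansion over a strictly increasing key list is weakly increasing
lemma pairwise_le_expand (ks : List String) (h : ks.Pairwise (· < ·)) (n : String → Nat) :
    (ks.flatMap (fun k => List.replicate (n k) k)).Pairwise (· ≤ ·) := by
  induction ks with
  | nil => simp
  | cons k ks ih =>
    rw [List.flatMap_cons, List.pairwise_append]
    refine ⟨?_, ih (List.pairwise_cons.mp h).2, ?_⟩
    · exact List.pairwise_replicate.mpr (Or.inr (le_refl k))
    · intro a ha b hb
      obtain ⟨k', hk', hb'⟩ := List.mem_flatMap.mp hb
      rw [List.eq_of_mem_replicate ha, List.eq_of_mem_replicate hb']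
      exact le_of_lt ((List.pairwise_cons.mp h).1 k' hk')

-- the sorted multiset IS the expansion of its counter over the sorted distinct elements
lemma sorted_expand (L : List String) :
    PySem.List.sorted L (fun x => x) false
      = (PySem.List.sorted (PySem.Set.ofList L) (fun x => x) false).flatMap
          (fun c => List.replicate (L.count c) c) := by
  have hperm : (PySem.List.sorted (PySem.Set.ofList L) (fun x => x) false).Perm (PySem.Set.ofList L) :=
    PySem.List.sorted_perm _ _ _
  have hnd : (PySem.List.sorted (PySem.Set.ofList L) (fun x => x) false).Nodup :=
    hperm.symm.nodup (PySem.Set.nodup_ofList L)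
  have hp : ((PySem.List.sorted (PySem.Set.ofList L) (fun x => x) false).flatMap
      (fun c => List.replicate (L.count c) c)).Perm L := by
    rw [List.perm_iff_count]
    intro v
    rw [count_expand _ hnd]
    by_cases hv : v ∈ L
    · rw [if_pos (hperm.mem_iff.mpr ((PySem.Set.mem_ofList _ _).mpr hv))]
    · rw [if_neg (fun h => hv ((PySem.Set.mem_ofList _ _).mp (hperm.mem_iff.mp h))),
        List.count_eq_zero_of_not_mem hv]
  exact PySem.List.sorted_id_eq_of_perm_of_pairwise _ _ hp
    (pairwise_le_expand _ (PySem.List.sorted_ofList_pairwise_lt L) _)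

-- ===== VERDICT (by name: the statement is the Claim_ definition above) =====
theorem get_clubs_of_friends_spec : Claim_equal_get_clubs_of_friends := by
  intro pf pc person _
  unfold Spec_get_clubs_of_friends
  simp only [get_clubs_of_friends, get_clubs_of_friends_alt]
  set p2f : PySem.Dict String (List String) := PySem.Dict.ofList pf with hp2f
  set p2c : PySem.Dict String (List String) := PySem.Dict.ofList pc with hp2c
  by_cases hf : p2f.contains person = false
  · simp [hf]
  · simp only [if_neg hf]
    set friends : PySem.Set String := PySem.Set.ofList (p2f.getD person []) with hfr
    set own : PySem.Set String := PySem.Set.ofList (p2c.getD person []) with hown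
    set L : List String :=
      (p2c.items.filter (fun kv => PySem.Set.contains friends kv.1)).flatMap
        (fun kv => kv.2.filter (fun c => !(PySem.Set.contains own c))) with hL
    have hnd : p2c.keys.Nodup := PySem.Dict.nodup_keys_ofList pc
    -- A's side: the key-indexed double loop is the sorted multiset of L
    have hA : p2c.keys.foldl (fun list_clubs key =>
        if key ∈ p2f.getD person [] then
          (p2c.getD key []).foldl (fun list_clubs club =>
            let list_clubs :=
              if p2c.contains person = false then
                PySem.List.sorted (list_clubs ++ [club]) (fun x => x) false
              else list_clubs
            if p2c.contains person = true ∧ club ∉ p2c.getD person [] then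
              PySem.List.sorted (list_clubs ++ [club]) (fun x => x) false
            else list_clubs) list_clubs
        else list_clubs) []
        = PySem.List.sorted L (fun x => x) false := by
      have hkeys : p2c.keys = p2c.items.map (fun kv => kv.1) := rfl
      rw [hkeys, List.foldl_map]
      refine Eq.trans
        (PySem.List.foldl_congr_mem' _ _
          (fun (a : List String) (kv : String × List String) =>
            if PySem.Set.contains friends kv.1 = true then
              kv.2.foldl (fun a2 c =>
                if (!(PySem.Set.contains own c)) = true then
                  PySem.List.sorted (a2 ++ [c]) (fun x => x) false
                else a2) a
            else a)
          _ ?_) ?_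
      · intro kv hkv a
        obtain ⟨k, v⟩ := kv
        have hval : p2c.getD k [] = v := PySem.Dict.getD_of_mem_items _ hkv hnd []
        rw [hval]
        by_cases hq : k ∈ p2f.getD person []
        · rw [if_pos hq]
          have hq2 : friends.contains k = true := by
            rw [hfr, PySem.Set.contains_iff, PySem.Set.mem_ofList]; exact hq
          simp only [hq2]
          by_cases hcp : p2c.contains person = false
          · have hnone : p2c.get? person = none := by
              rw [PySem.Dict.get?_eq_none_iff_contains]; exact hcp
            have hownD : p2c.getD person [] = [] := by
              simp [PySem.Dict.getD, hnone]
            apply PySem.List.foldl_congr_mem'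
            intro c _ a2
            simp [hcp, hown, hownD, PySem.Set.contains_eq_listContains]
          · have hcp' : p2c.contains person = true := by
              cases h' : p2c.contains person
              · exact absurd h' hcp
              · rfl
            apply PySem.List.foldl_congr_mem'
            intro c _ a2
            by_cases hm : c ∈ p2c.getD person []
            · simp [hcp', hm, hown, PySem.Set.contains_eq_listContains,
                PySem.Set.mem_ofList]
            · simp [hcp', hm, hown, PySem.Set.contains_eq_listContains,
                PySem.Set.mem_ofList]
        · have hq2 : friends.contains k = false := by
            simp [hfr, PySem.Set.contains_eq_listContains, PySem.Set.mem_ofList, hq]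
          rw [if_neg hq]
          simp only [hq2, Bool.false_eq_true, if_false]
      · have hout := outer_loop p2c.items
          (fun s => PySem.Set.contains friends s)
          (fun c => !(PySem.Set.contains own c)) []
        simpa [hL] using hout
    rw [hA]
    -- B's side: the counting dict is exactly the counter of L
    have hcounts : p2c.items.foldl (fun counts kv =>
        if PySem.Set.contains friends kv.1 = true then
          kv.2.foldl (fun counts club =>
            if PySem.Set.contains own club = false then
              PySem.Dict.modify counts club 0 (· + 1)
            else counts) counts
        else counts) PySem.Dict.empty
        = PySem.Dict.counter L := by
      have h1 : ∀ (d : PySem.Dict String Int) (kv : String × List String),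
          kv.2.foldl (fun counts club =>
            if PySem.Set.contains own club = false then
              PySem.Dict.modify counts club 0 (· + 1)
            else counts) d
          = (kv.2.filter (fun c => !(PySem.Set.contains own c))).foldl
              (fun counts club => PySem.Dict.modify counts club 0 (· + 1)) d := by
        intro d kv
        rw [List.foldl_filter]
        apply PySem.List.foldl_congr_mem'
        intro x _ a
        cases h' : PySem.Set.contains own x
        · simp
        · simp
      rw [PySem.Dict.counter_eq_foldl, hL, List.foldl_flatMap, List.foldl_filter]
      apply PySem.List.foldl_congr_mem'
      intro kv _ d
      by_cases hq : PySem.Set.contains friends kv.1 = true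
      · rw [if_pos hq, if_pos hq, h1]
      · rw [if_neg hq, if_neg hq]
    rw [hcounts, PySem.Dict.keys_counter, PySem.List.foldl_append_eq_flatMap,
      List.nil_append]
    have hfun : (fun club => List.replicate ((PySem.Dict.counter L).getD club 0).toNat club)
        = fun club => List.replicate (L.count club) club := by
      funext c
      rw [PySem.Dict.getD_counter]
      simp
    rw [hfun, sorted_expand L]
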